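-- pv_equiv track=rewrite | github.com/DEV-ZERO-cloud/SteamAgentRecommendator | src/engine/motor_logico.py | compute_similar_pairs
-- ===== SOURCE A (Python) =====
-- def similar_game(tags1: set[str], tags2: set[str]) -> bool:
--     """Dos juegos son similares si comparten al menos 2 tags distintos."""
--     return len(tags1 & tags2) >= 2
--
-- def compute_similar_pairs(tags_by_gid: dict[str, set[str]]) -> set[tuple[str, str]]:
--     """
--     Calcula todos los pares similares sobre el conjunto de candidatos.
--     O(n²) pero n <= 50, barato en la práctica.
--     Retorna set de (gid1, gid2) donde similar_game es True.
--     """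
--     gids = list(tags_by_gid.keys())
--     pairs: set[tuple[str, str]] = set()
--     for i, g1 in enumerate(gids):
--         for g2 in gids[i + 1:]:
--             if similar_game(tags_by_gid[g1], tags_by_gid[g2]):
--                 pairs.add((g1, g2))
--                 pairs.add((g2, g1))  # simétrico
--     return pairs
-- ===== SOURCE B (Python) =====
-- def compute_similar_pairs(tags_by_gid: dict[str, set[str]]) -> set[tuple[str, str]]:
--     """Inverted index tag -> games, then co-occurrence counting per game pair:
--     a pair shares >= 2 tags iff its co-occurrence count reaches 2."""
--     index: dict[str, list[str]] = {}
--     for gid, tags in tags_by_gid.items():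
--         for t in tags:
--             index.setdefault(t, []).append(gid)
--     shared: dict[tuple[str, str], int] = {}
--     for bucket in index.values():
--         for i, g1 in enumerate(bucket):
--             for g2 in bucket[i + 1:]:
--                 shared[(g1, g2)] = shared.get((g1, g2), 0) + 1
--     gids = list(tags_by_gid)
--     pairs: set[tuple[str, str]] = set()
--     for i, g1 in enumerate(gids):
--         for g2 in gids[i + 1:]:
--             if shared.get((g1, g2), 0) >= 2:
--                 pairs.add((g1, g2))
--                 pairs.add((g2, g1))
--     return pairs
-- ===== Notes on version B (the rewrite author's own statement) =====
-- stated objective: alternative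
-- what changed: B replaces the all-pairs tag-set intersections with an inverted index (tag -> games) plus a co-occurrence counter keyed by game pair, then emits a pair when its counter reaches 2.
import Mathlib
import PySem

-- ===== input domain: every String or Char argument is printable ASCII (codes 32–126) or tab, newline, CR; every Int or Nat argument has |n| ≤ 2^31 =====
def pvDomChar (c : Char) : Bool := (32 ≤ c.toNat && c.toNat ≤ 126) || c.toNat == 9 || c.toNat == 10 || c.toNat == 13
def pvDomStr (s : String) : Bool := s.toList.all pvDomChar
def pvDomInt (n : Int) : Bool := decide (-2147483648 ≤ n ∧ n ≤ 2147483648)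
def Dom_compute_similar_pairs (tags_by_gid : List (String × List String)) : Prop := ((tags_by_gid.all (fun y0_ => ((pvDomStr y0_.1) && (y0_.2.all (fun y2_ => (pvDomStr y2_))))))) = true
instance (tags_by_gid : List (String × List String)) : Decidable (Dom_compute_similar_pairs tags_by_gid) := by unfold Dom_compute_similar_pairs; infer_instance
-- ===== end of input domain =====

-- B replaces the all-pairs tag-set intersections with an inverted index (tag → games) and
-- per-pair co-occurrence counting; equivalence of the RETURN value is proved on valid dict-of-set inputs.

-- ===== PORT A =====
def similar_game (tags1 : List String) (tags2 : List String) : Bool :=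
  decide (2 ≤ (PySem.Set.inter tags1 tags2).length)

def compute_similar_pairs (tags_by_gid : List (String × List String)) : List (String × String) :=
  let d := PySem.Dict.mk tags_by_gid
  let gids := d.keys
  (PySem.List.enumerate gids 0).foldl (fun pairs ig =>
    (PySem.List.slice gids (some (ig.1 + 1)) none).foldl (fun pairs g2 =>
      -- tags_by_gid[g1] / tags_by_gid[g2]: the keys come from the dict, so lookup always
      -- succeeds; getD's default [] is never used
      if similar_game (d.getD ig.2 []) (d.getD g2 []) then
        PySem.Set.add (PySem.Set.add pairs (ig.2, g2)) (g2, ig.2)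
      else pairs) pairs)
    PySem.Set.empty

-- ===== PORT B =====
def compute_similar_pairs_alt (tags_by_gid : List (String × List String)) : List (String × String) :=
  let index : PySem.Dict String (List String) :=
    tags_by_gid.foldl (fun idx p =>
      p.2.foldl (fun idx t => idx.modify t [] (fun b => b ++ [p.1])) idx)
      PySem.Dict.empty
  let shared : PySem.Dict (String × String) Int :=
    index.values.foldl (fun sh bucket =>
      (PySem.List.enumerate bucket 0).foldl (fun sh ig =>
        (PySem.List.slice bucket (some (ig.1 + 1)) none).foldl (fun sh g2 =>
          sh.insert (ig.2, g2) (sh.getD (ig.2, g2) 0 + 1)) sh) sh)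
      PySem.Dict.empty
  let gids := (PySem.Dict.mk tags_by_gid).keys
  (PySem.List.enumerate gids 0).foldl (fun pairs ig =>
    (PySem.List.slice gids (some (ig.1 + 1)) none).foldl (fun pairs g2 =>
      if 2 ≤ shared.getD (ig.2, g2) 0 then
        PySem.Set.add (PySem.Set.add pairs (ig.2, g2)) (g2, ig.2)
      else pairs) pairs)
    PySem.Set.empty

-- ===== PRECONDITION & SPEC =====
-- Pre_ admits exactly the valid representations of A's input type dict[str, set[str]]:
-- keys pairwise distinct (a Python dict cannot hold duplicate keys) and each tag list
-- duplicate-free (it represents a set); no Python input corresponds to an excluded list.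
def Pre_compute_similar_pairs (tags_by_gid : List (String × List String)) : Prop :=
  (tags_by_gid.map Prod.fst).Nodup ∧ ∀ p ∈ tags_by_gid, p.2.Nodup
instance (tags_by_gid : List (String × List String)) : Decidable (Pre_compute_similar_pairs tags_by_gid) := by unfold Pre_compute_similar_pairs; infer_instance

def pvWitness_compute_similar_pairs : (List (String × List String)) :=
  [("a", ["x", "y", "z"]), ("b", ["x", "y"]), ("c", ["z"])]

def Spec_compute_similar_pairs (tags_by_gid : List (String × List String)) (out : List (String × String)) : Prop := out = compute_similar_pairs_alt tags_by_gid
instance (tags_by_gid : List (String × List String)) (out : List (String × String)) : Decidable (Spec_compute_similar_pairs tags_by_gid out) := by unfold Spec_compute_similar_pairs; infer_instance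

-- ===== CLAIM (what is proved, stated in full; the proofs are below) =====
def Claim_equal_compute_similar_pairs : Prop := ∀ (tags_by_gid : List (String × List String)), Dom_compute_similar_pairs tags_by_gid → Pre_compute_similar_pairs tags_by_gid → Spec_compute_similar_pairs tags_by_gid (compute_similar_pairs tags_by_gid)

-- ===== LEMMAS AND PROOFS =====

def orderedPairs {α : Type} : List α → List (α × α)
  | [] => []
  | x :: xs => xs.map (fun y => (x, y)) ++ orderedPairs xs

def tagPairs (tb : List (String × List String)) : List (String × String) :=
  tb.flatMap (fun q => q.2.map (fun t => (t, q.1)))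

def idxOf (tb : List (String × List String)) : PySem.Dict String (List String) :=
  (tagPairs tb).foldl (fun d p => d.modify p.1 [] (fun b => b ++ [p.2])) PySem.Dict.empty

def bucketOf (tb : List (String × List String)) (t : String) : List String :=
  (tb.filter (fun q => q.2.contains t)).map Prod.fst

lemma idx_eq (tb : List (String × List String)) :
    tb.foldl (fun idx p =>
      p.2.foldl (fun idx t => idx.modify t [] (fun b => b ++ [p.1])) idx)
      PySem.Dict.empty = idxOf tb := by
  rw [idxOf, tagPairs, List.foldl_flatMap]
  simp only [List.foldl_map]

lemma filter_beq_of_nodup {α : Type} [BEq α] [LawfulBEq α] {l : List α} (h : l.Nodup) (t : α) :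
    l.filter (· == t) = if t ∈ l then [t] else [] := by
  induction l with
  | nil => simp
  | cons x xs ih =>
    rcases List.nodup_cons.mp h with ⟨hx, hxs⟩
    by_cases hxt : x = t
    · subst hxt
      simp [ih hxs, hx]
    · simp [beq_eq_false_iff_ne.mpr hxt, ih hxs, List.mem_cons,
        (by simpa [eq_comm] using hxt : ¬ t = x)]

lemma idx_getD (tb : List (String × List String)) (ht : ∀ p ∈ tb, p.2.Nodup) (t : String) :
    (idxOf tb).getD t [] = bucketOf tb t := by
  rw [idxOf, PySem.Dict.getD_foldl_modify_append]
  simp only [PySem.Dict.getD_empty, List.nil_append]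
  rw [tagPairs, List.filter_flatMap]
  induction tb with
  | nil => simp [bucketOf]
  | cons q tb ih =>
    have hq : q.2.Nodup := ht q (by simp)
    simp only [List.flatMap_cons, List.map_append, bucketOf, List.filter_cons]
    rw [List.filter_map]
    have : (fun p => p.1 == t) ∘ (fun t' => (t', q.1)) = (· == t) := rfl
    rw [this, filter_beq_of_nodup hq t]
    by_cases hm : t ∈ q.2
    · simp only [hm, if_true, List.map_cons, List.map_nil]
      have : q.2.contains t = true := by simpa using hm
      simp only [this, if_true]
      rw [ih (fun p hp => ht p (by simp [hp]))]
      rfl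
    · simp only [hm, if_false, List.map_nil, List.nil_append]
      have : q.2.contains t = false := by simpa using hm
      simp only [this, Bool.false_eq_true, if_false]
      exact ih (fun p hp => ht p (by simp [hp]))

lemma idx_keys (tb : List (String × List String)) :
    (idxOf tb).keys = PySem.Set.ofList ((tagPairs tb).map Prod.fst) := by
  rw [idxOf, PySem.Dict.keys_foldl_modify_key, PySem.Dict.keys_empty, PySem.Set.update_nil_left]

lemma idx_keys_nodup (tb : List (String × List String)) : (idxOf tb).keys.Nodup :=
  PySem.Dict.nodup_keys_foldl_modify_key _ _ _ _ _ PySem.Dict.nodup_keys_empty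

lemma pair_sublist_cons {α : Type} (a b x : α) (xs : List α) :
    [a, b].Sublist (x :: xs) ↔ (a = x ∧ b ∈ xs) ∨ [a, b].Sublist xs := by
  constructor
  · intro h
    rcases h with h | ⟨h⟩
    · exact Or.inr (by assumption)
    · next h => exact Or.inl ⟨rfl, List.singleton_sublist.mp h⟩
  · rintro (⟨rfl, hb⟩ | h)
    · exact List.cons_sublist_cons.mpr (List.singleton_sublist.mpr hb)
    · exact h.cons x

lemma mem_orderedPairs {α : Type} (xs : List α) (a b : α) :
    (a, b) ∈ orderedPairs xs ↔ [a, b].Sublist xs := by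
  induction xs with
  | nil => simp [orderedPairs]
  | cons x xs ih =>
    simp only [orderedPairs, List.mem_append, List.mem_map, ih, pair_sublist_cons]
    constructor
    · rintro (⟨y, hy, he⟩ | h)
      · cases he; exact Or.inl ⟨rfl, hy⟩
      · exact Or.inr h
    · rintro (⟨rfl, hb⟩ | h)
      · exact Or.inl ⟨b, hb, rfl⟩
      · exact Or.inr h

lemma fst_mem_of_mem_orderedPairs {α : Type} {xs : List α} {p : α × α}
    (h : p ∈ orderedPairs xs) : p.1 ∈ xs := by
  obtain ⟨a, b⟩ := p
  exact ((mem_orderedPairs xs a b).mp h).subset (by simp)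

lemma nodup_orderedPairs {α : Type} {xs : List α} (h : xs.Nodup) : (orderedPairs xs).Nodup := by
  induction xs with
  | nil => simp [orderedPairs]
  | cons x xs ih =>
    rcases List.nodup_cons.mp h with ⟨hx, hxs⟩
    simp only [orderedPairs]
    refine List.Nodup.append (hxs.map ?_) (ih hxs) ?_
    · intro y z he
      exact congrArg Prod.snd he
    · intro p hp1 hp2
      have := fst_mem_of_mem_orderedPairs hp2
      rcases List.mem_map.mp hp1 with ⟨y, _, rfl⟩
      exact hx this

lemma count_orderedPairs {α : Type} [DecidableEq α] {xs : List α} (h : xs.Nodup) (a b : α) :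
    (orderedPairs xs).count (a, b) = if [a, b].Sublist xs then 1 else 0 := by
  by_cases hm : [a, b].Sublist xs
  · simp only [hm, if_true]
    exact List.count_eq_one_of_mem (nodup_orderedPairs h) ((mem_orderedPairs xs a b).mpr hm)
  · simp only [hm, if_false]
    exact List.count_eq_zero_of_not_mem (fun hc => hm ((mem_orderedPairs xs a b).mp hc))

lemma sublist_pair_of_mem {α : Type} {l m : List α} {a b : α} (hlm : l.Sublist m) :
    m.Nodup → [a, b].Sublist m → a ∈ l → b ∈ l → [a, b].Sublist l := by
  induction hlm with
  | slnil => intro _ _ ha _; cases ha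
  | cons x hlm ih =>
    intro hm hab ha hb
    rcases List.nodup_cons.mp hm with ⟨hx, hm'⟩
    rcases (pair_sublist_cons a b x _).mp hab with ⟨rfl, _⟩ | h
    · exact absurd (hlm.subset ha) hx
    · exact ih hm' h ha hb
  | cons₂ x hlm ih =>
    rename_i l' m'
    intro hm hab ha hb
    rcases List.nodup_cons.mp hm with ⟨hx, hm'⟩
    rcases (pair_sublist_cons a b x _).mp hab with ⟨rfl, hbm⟩ | h
    · rcases List.mem_cons.mp hb with rfl | hb
      · exact absurd hbm hx
      · exact (pair_sublist_cons a b a _).mpr (Or.inl ⟨rfl, hb⟩)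
    · have haa : a ∈ l' := by
        rcases List.mem_cons.mp ha with rfl | ha
        · exact absurd (h.subset (by simp)) hx
        · exact ha
      have hbb : b ∈ l' := by
        rcases List.mem_cons.mp hb with rfl | hb
        · exact absurd (h.subset (by simp)) hx
        · exact hb
      exact (ih hm' h haa hbb).cons x

lemma enum_slice_foldl_aux {α β : Type} (full : List α) (f : β → α → α → β) :
    ∀ (s : Nat) (xs : List α), xs = full.drop s → ∀ (init : β),
    (PySem.List.enumerate xs (s : Int)).foldl (fun acc ig =>
      (PySem.List.slice full (some (ig.1 + 1)) none).foldl (fun acc y => f acc ig.2 y) acc) init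
    = (orderedPairs xs).foldl (fun acc p => f acc p.1 p.2) init := by
  intro s xs
  induction xs generalizing s with
  | nil => intro _ init; simp [PySem.List.enumerate, orderedPairs]
  | cons x xs ih =>
    intro h init
    have hxs : xs = full.drop (s + 1) := by
      rw [← List.tail_drop, ← h]
      rfl
    rw [PySem.List.enumerate_cons]
    simp only [List.foldl_cons, orderedPairs, List.foldl_append]
    have hc : (s : Int) + 1 = ((s + 1 : Nat) : Int) := by push_cast; ring
    rw [hc, PySem.List.slice_from_natCast, ← hxs, ← ih (s+1) hxs, List.foldl_map]

lemma enum_slice_foldl {α β : Type} (xs : List α) (f : β → α → α → β) (init : β) :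
    (PySem.List.enumerate xs 0).foldl (fun acc ig =>
      (PySem.List.slice xs (some (ig.1 + 1)) none).foldl (fun acc y => f acc ig.2 y) acc) init
    = (orderedPairs xs).foldl (fun acc p => f acc p.1 p.2) init := by
  have h := enum_slice_foldl_aux xs f 0 xs (by simp) init
  simpa using h

def sharedOf (tb : List (String × List String)) : PySem.Dict (String × String) Int :=
  ((idxOf tb).values.flatMap orderedPairs).foldl
    (fun sh p => sh.insert p (sh.getD p 0 + 1)) PySem.Dict.empty

lemma shared_eq (tb : List (String × List String)) :
    (idxOf tb).values.foldl (fun sh bucket =>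
      (PySem.List.enumerate bucket 0).foldl (fun sh ig =>
        (PySem.List.slice bucket (some (ig.1 + 1)) none).foldl (fun sh g2 =>
          sh.insert (ig.2, g2) (sh.getD (ig.2, g2) 0 + 1)) sh) sh)
      PySem.Dict.empty = sharedOf tb := by
  rw [sharedOf, List.foldl_flatMap]
  exact PySem.List.foldl_congr_mem _ _ _ _ (by intro sh b _; exact enum_slice_foldl b (fun sh a b' => sh.insert (a, b') (sh.getD (a, b') 0 + 1)) sh)

lemma eq_of_mem_of_nodup_fst {tb : List (String × List String)} (hk : (tb.map Prod.fst).Nodup)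
    {g : String} {S S' : List String} (h1 : (g, S) ∈ tb) (h2 : (g, S') ∈ tb) : S = S' := by
  have hkeys : (PySem.Dict.mk tb).keys.Nodup := hk
  have e1 := PySem.Dict.getD_of_mem_items (PySem.Dict.mk tb) h1 hkeys []
  have e2 := PySem.Dict.getD_of_mem_items (PySem.Dict.mk tb) h2 hkeys []
  rw [← e1, ← e2]

lemma mem_bucket {tb : List (String × List String)} (hk : (tb.map Prod.fst).Nodup)
    {g : String} {S : List String} (hgS : (g, S) ∈ tb) (t : String) :
    g ∈ bucketOf tb t ↔ t ∈ S := by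
  simp only [bucketOf, List.mem_map, List.mem_filter]
  constructor
  · rintro ⟨q, ⟨hq, hc⟩, rfl⟩
    have : q.2 = S := eq_of_mem_of_nodup_fst hk (by simpa using hq) hgS
    simpa [this] using hc
  · intro hts
    exact ⟨(g, S), ⟨hgS, by simpa using hts⟩, rfl⟩

lemma bucket_sublist (tb : List (String × List String)) (t : String) :
    (bucketOf tb t).Sublist (tb.map Prod.fst) :=
  (List.filter_sublist (l := tb)).map Prod.fst

lemma sum_map_ite_nat {α : Type} (l : List α) (p : α → Prop) [DecidablePred p] :
    (l.map (fun x => if p x then 1 else 0)).sum = l.countP (fun x => decide (p x)) := by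
  induction l with
  | nil => rfl
  | cons x xs ih =>
    simp only [List.map_cons, List.sum_cons, List.countP_cons, ih]
    by_cases h : p x <;> simp [h, Nat.add_comm]

lemma mem_keys_of_mem_tags {tb : List (String × List String)} {g t : String}
    {S : List String} (hgS : (g, S) ∈ tb) (htS : t ∈ S) : t ∈ (idxOf tb).keys := by
  rw [idx_keys, PySem.Set.mem_ofList]
  exact List.mem_map.mpr ⟨(t, g), List.mem_flatMap.mpr ⟨(g, S), hgS, List.mem_map.mpr ⟨t, htS, rfl⟩⟩, rfl⟩

lemma shared_getD_eq (tb : List (String × List String)) (hk : (tb.map Prod.fst).Nodup)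
    (ht : ∀ p ∈ tb, p.2.Nodup) {g1 g2 : String} {S1 S2 : List String}
    (h1 : (g1, S1) ∈ tb) (h2 : (g2, S2) ∈ tb)
    (hsub : [g1, g2].Sublist (tb.map Prod.fst)) :
    (sharedOf tb).getD (g1, g2) 0 = ((S1.filter (fun t => S2.contains t)).length : Int) := by
  rw [sharedOf, PySem.Dict.getD_foldl_insert_add_one, PySem.Dict.getD_empty, zero_add]
  rw [List.count_flatMap]
  rw [PySem.Dict.values_eq_map_keys _ (idx_keys_nodup tb) [], List.map_map]
  have hmapc : ((idxOf tb).keys.map ((List.count (g1, g2) ∘ orderedPairs) ∘ fun k => (idxOf tb).getD k []))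
      = (idxOf tb).keys.map (fun t => if t ∈ S1 ∧ t ∈ S2 then 1 else 0) := by
    apply List.map_congr_left
    intro t _
    simp only [Function.comp_apply, idx_getD tb ht t]
    rw [count_orderedPairs ((bucket_sublist tb t).nodup hk)]
    congr 1
    simp only [eq_iff_iff]
    constructor
    · intro hs
      exact ⟨(mem_bucket hk h1 t).mp (hs.subset (by simp)),
             (mem_bucket hk h2 t).mp (hs.subset (by simp))⟩
    · rintro ⟨ht1, ht2⟩
      exact sublist_pair_of_mem (bucket_sublist tb t) hk hsub
        ((mem_bucket hk h1 t).mpr ht1) ((mem_bucket hk h2 t).mpr ht2)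
  rw [hmapc, sum_map_ite_nat]
  congr 1
  rw [List.countP_eq_length_filter]
  have hperm : ((idxOf tb).keys.filter (fun t => decide (t ∈ S1 ∧ t ∈ S2))).Perm
      (S1.filter (fun t => S2.contains t)) := by
    rw [List.perm_ext_iff_of_nodup ((idx_keys_nodup tb).filter _) ((ht _ h1).filter _)]
    intro t
    simp only [List.mem_filter, decide_eq_true_eq, List.contains_iff_mem]
    constructor
    · rintro ⟨_, ht1, ht2⟩; exact ⟨ht1, by simpa using ht2⟩
    · rintro ⟨ht1, ht2⟩
      exact ⟨mem_keys_of_mem_tags h1 ht1, ht1, by simpa using ht2⟩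
  exact hperm.length_eq


theorem main_eq (tb : List (String × List String)) (hk : (tb.map Prod.fst).Nodup)
    (ht : ∀ p ∈ tb, p.2.Nodup) : compute_similar_pairs tb = compute_similar_pairs_alt tb := by
  simp only [compute_similar_pairs, compute_similar_pairs_alt]
  rw [idx_eq, shared_eq]
  rw [enum_slice_foldl _ (fun pairs a b =>
    if similar_game ((PySem.Dict.mk tb).getD a []) ((PySem.Dict.mk tb).getD b []) then
      PySem.Set.add (PySem.Set.add pairs (a, b)) (b, a) else pairs)]
  rw [enum_slice_foldl _ (fun pairs a b =>
    if 2 ≤ (sharedOf tb).getD (a, b) 0 then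
      PySem.Set.add (PySem.Set.add pairs (a, b)) (b, a) else pairs)]
  apply PySem.List.foldl_congr_mem
  intro acc p hp
  obtain ⟨g1, g2⟩ := p
  have hsub : [g1, g2].Sublist ((PySem.Dict.mk tb).keys) := (mem_orderedPairs _ g1 g2).mp hp
  have hsub' : [g1, g2].Sublist (tb.map Prod.fst) := hsub
  obtain ⟨q1, hq1, he1⟩ := List.mem_map.mp (hsub'.subset (by simp) : g1 ∈ tb.map Prod.fst)
  obtain ⟨q2, hq2, he2⟩ := List.mem_map.mp (hsub'.subset (by simp) : g2 ∈ tb.map Prod.fst)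
  have h1 : (g1, q1.2) ∈ tb := by rw [← he1]; exact hq1
  have h2 : (g2, q2.2) ∈ tb := by rw [← he2]; exact hq2
  have hd1 : (PySem.Dict.mk tb).getD g1 [] = q1.2 :=
    PySem.Dict.getD_of_mem_items (PySem.Dict.mk tb) h1 hk []
  have hd2 : (PySem.Dict.mk tb).getD g2 [] = q2.2 :=
    PySem.Dict.getD_of_mem_items (PySem.Dict.mk tb) h2 hk []
  have hcond : similar_game ((PySem.Dict.mk tb).getD g1 []) ((PySem.Dict.mk tb).getD g2 [])
      = decide (2 ≤ (sharedOf tb).getD (g1, g2) 0) := by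
    rw [hd1, hd2, shared_getD_eq tb hk ht h1 h2 hsub', similar_game]
    apply decide_eq_decide.mpr
    show 2 ≤ (PySem.Set.inter q1.2 q2.2).length ↔ _
    have : PySem.Set.inter q1.2 q2.2 = q1.2.filter (fun t => q2.2.contains t) := rfl
    rw [this]
    exact_mod_cast Iff.rfl
  rw [hcond]
  simp [decide_eq_true_eq]

-- ===== VERDICT (by name: the statement is the Claim_ definition above) =====
theorem compute_similar_pairs_spec : Claim_equal_compute_similar_pairs := by
  intro tb _ hpre
  show compute_similar_pairs tb = compute_similar_pairs_alt tb
  exact main_eq tb hpre.1 hpre.2
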